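-- pv_equiv track=rewrite | github.com/swifttl/Advent_of_Code_2015 | Day5pt2.py | skipcheck
-- ===== SOURCE A (Python) =====
-- def skipcheck(line):
--     niceORnaughty = "naughty"
--     for ch in range(len(line[:-2])):
--         if line[ch] == line[ch+2]:
--             niceORnaughty = "nice"
--     if niceORnaughty == "nice":
--         return True
--     else:
--         return False
-- ===== SOURCE B (Python) =====
-- def skipcheck(line):
--     # Parity split: a letter repeated with one gap between is exactly an
--     # ADJACENT duplicate in one of the two parity subsequences line[::2], line[1::2].
--     def has_adjacent_pair(s):
--         return any(a == b for a, b in zip(s, s[1:]))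
--     return has_adjacent_pair(line[::2]) or has_adjacent_pair(line[1::2])
-- ===== Notes on version B (the rewrite author's own statement) =====
-- stated objective: alternative
-- what changed: Instead of scanning all indices and comparing line[i] with line[i+2] into a flag, B splits the string into its even- and odd-indexed subsequences and checks each for an adjacent duplicate (a gap-one repeat is exactly an adjacent pair in one parity class), short-circuiting at the first match.
import Mathlib
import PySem

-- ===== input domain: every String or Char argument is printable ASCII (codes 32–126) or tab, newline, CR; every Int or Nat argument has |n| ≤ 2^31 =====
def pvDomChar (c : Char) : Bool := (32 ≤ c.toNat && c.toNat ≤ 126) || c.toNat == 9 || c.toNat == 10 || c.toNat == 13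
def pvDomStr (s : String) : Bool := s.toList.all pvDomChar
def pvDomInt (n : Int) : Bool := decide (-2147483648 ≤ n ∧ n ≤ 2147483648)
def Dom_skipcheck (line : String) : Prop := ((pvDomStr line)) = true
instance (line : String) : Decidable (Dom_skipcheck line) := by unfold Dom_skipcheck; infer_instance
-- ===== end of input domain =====

-- B replaces A's index loop comparing line[i] with line[i+2] by a parity split:
-- a gap-one repeat is exactly an adjacent duplicate in line[::2] or line[1::2] (alternative, same cost).

-- ===== PORT A =====
-- line[ch] / line[ch+2]: every index the loop uses is in range (ch < len-2), so getD never
-- takes its default; the range bound is len(line[:-2]) via the PySem slice, exact as Python.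
def skipcheck (line : String) : Bool :=
  let cs := line.toList
  let niceORnaughty :=
    (List.range (PySem.List.slice cs none (some (-2))).length).foldl
      (fun s ch => if cs.getD ch ' ' == cs.getD (ch + 2) ' ' then "nice" else s)
      "naughty"
  if niceORnaughty == "nice" then true else false

-- ===== PORT B =====
-- hand port of the step-2 slice s[::2] (PySem.List.slice? is Option-valued for a general
-- step); pvEveryOther takes every second element starting at index 0, exact for step 2.
def pvEveryOther : List Char → List Char
  | [] => []
  | [a] => [a]
  | a :: _ :: t => a :: pvEveryOther t

-- any(a == b for a, b in zip(s, s[1:]))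
def pvHasAdjacentPair (s : List Char) : Bool :=
  (s.zip s.tail).any (fun p => p.1 == p.2)

def skipcheck_alt (line : String) : Bool :=
  let cs := line.toList
  pvHasAdjacentPair (pvEveryOther cs) || pvHasAdjacentPair (pvEveryOther cs.tail)

-- ===== PRECONDITION & SPEC =====
def Spec_skipcheck (line : String) (out : Bool) : Prop := out = skipcheck_alt line
instance (line : String) (out : Bool) : Decidable (Spec_skipcheck line out) := by unfold Spec_skipcheck; infer_instance

-- ===== CLAIM (what is proved, stated in full; the proofs are below) =====
def Claim_equal_skipcheck : Prop := ∀ (line : String), Dom_skipcheck line → Spec_skipcheck line (skipcheck line)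

-- ===== LEMMAS AND PROOFS =====

-- A's flag fold is "nice" exactly when some index in range satisfies the comparison.
theorem skipcheck_fold_eq (cs : List Char) (n : Nat) :
    ((List.range n).foldl
      (fun s ch => if cs.getD ch ' ' == cs.getD (ch + 2) ' ' then "nice" else s)
      "naughty")
    = (if (List.range n).any (fun ch => cs.getD ch ' ' == cs.getD (ch + 2) ' ')
        then "nice" else "naughty") := by
  induction n with
  | zero => simp
  | succ k ih =>
    rw [List.range_succ, List.foldl_append, List.any_append, ih]
    simp only [List.foldl_cons, List.foldl_nil, List.any_cons, List.any_nil, Bool.or_false]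
    cases h : (cs.getD k ' ' == cs.getD (k + 2) ' ') with
    | true => simp only [if_true, Bool.or_true]
    | false => simp only [Bool.false_eq_true, if_false, Bool.or_false]

theorem skipcheck_slice_len (cs : List Char) :
    (PySem.List.slice cs none (some (-2))).length = cs.length - 2 := by
  rw [PySem.List.slice_to_neg_ofNat cs 2 (by omega)]
  simp

theorem pvEveryOther_length (cs : List Char) :
    (pvEveryOther cs).length = (cs.length + 1) / 2 := by
  induction cs using pvEveryOther.induct with
  | case1 => simp [pvEveryOther]
  | case2 a => simp [pvEveryOther]
  | case3 a b t ih => simp [pvEveryOther, ih]; omega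

theorem pvEveryOther_getD (cs : List Char) (j : Nat) (h : 2 * j < cs.length) :
    (pvEveryOther cs).getD j ' ' = cs.getD (2 * j) ' ' := by
  induction cs using pvEveryOther.induct generalizing j with
  | case1 => simp at h
  | case2 a =>
    have : j = 0 := by simp at h; omega
    subst this; simp [pvEveryOther]
  | case3 a b t ih =>
    cases j with
    | zero => simp [pvEveryOther]
    | succ k =>
      have h' : 2 * k < t.length := by simp at h; omega
      have e : 2 * (k + 1) = (2 * k) + 1 + 1 := by omega
      rw [e]
      show (a :: pvEveryOther t).getD (k + 1) ' ' = ((a :: b :: t).getD (2 * k + 1 + 1) ' ')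
      rw [List.getD_cons_succ, List.getD_cons_succ, List.getD_cons_succ, ih k h']

-- zip(s, s[1:]) has an equal pair iff some adjacent positions of s are equal.
theorem pvHasAdjacentPair_iff (s : List Char) :
    pvHasAdjacentPair s = true ↔
      ∃ j, j + 1 < s.length ∧ s.getD j ' ' = s.getD (j + 1) ' ' := by
  unfold pvHasAdjacentPair
  simp only [List.any_eq_true]
  constructor
  · rintro ⟨p, hp, hpe⟩
    obtain ⟨i, hi, rfl⟩ := List.mem_iff_getElem.mp hp
    have hi' : i + 1 < s.length := by
      simp only [List.length_zip, List.length_tail] at hi; omega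
    refine ⟨i, hi', ?_⟩
    have h1 : i < s.length := by omega
    simpa [List.getElem_zip, List.getElem_tail, List.getD_eq_getElem, h1, hi'] using hpe
  · rintro ⟨j, hj, he⟩
    have hlen : j < (s.zip s.tail).length := by
      simp only [List.length_zip, List.length_tail]; omega
    refine ⟨(s.zip s.tail)[j], List.getElem_mem hlen, ?_⟩
    have h1 : j < s.length := by omega
    simpa [List.getElem_zip, List.getElem_tail, List.getD_eq_getElem, h1, hj] using he

theorem tail_getD (cs : List Char) (k : Nat) (h : k + 1 < cs.length) :
    cs.tail.getD k ' ' = cs.getD (k + 1) ' ' := by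
  have h' : k < cs.tail.length := by simp [List.length_tail]; omega
  rw [List.getD_eq_getElem _ _ h', List.getD_eq_getElem _ _ h, List.getElem_tail]

-- the parity split is exhaustive: a gap-one repeat at i lands in evens (i even) or odds (i odd).
theorem parity_iff (cs : List Char) :
    (∃ i, i + 2 < cs.length ∧ cs.getD i ' ' = cs.getD (i + 2) ' ') ↔
      (pvHasAdjacentPair (pvEveryOther cs) || pvHasAdjacentPair (pvEveryOther cs.tail)) = true := by
  simp only [Bool.or_eq_true, pvHasAdjacentPair_iff]
  constructor
  · rintro ⟨i, hi, he⟩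
    rcases Nat.even_or_odd i with ⟨j, hj⟩ | ⟨j, hj⟩
    · left
      refine ⟨j, ?_, ?_⟩
      · rw [pvEveryOther_length]; omega
      · rw [pvEveryOther_getD cs j (by omega), pvEveryOther_getD cs (j+1) (by omega)]
        have e1 : 2 * j = i := by omega
        have e2 : 2 * (j + 1) = i + 2 := by omega
        rw [e1, e2]; exact he
    · right
      refine ⟨j, ?_, ?_⟩
      · rw [pvEveryOther_length, List.length_tail]; omega
      · rw [pvEveryOther_getD cs.tail j (by simp [List.length_tail]; omega),
            pvEveryOther_getD cs.tail (j+1) (by simp [List.length_tail]; omega),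
            tail_getD cs (2*j) (by omega), tail_getD cs (2*(j+1)) (by omega)]
        have e1 : 2 * j + 1 = i := by omega
        have e2 : 2 * (j + 1) + 1 = i + 2 := by omega
        rw [e1, e2]; exact he
  · rintro (⟨j, hj, he⟩ | ⟨j, hj, he⟩)
    · rw [pvEveryOther_length] at hj
      refine ⟨2 * j, by omega, ?_⟩
      rw [pvEveryOther_getD cs j (by omega), pvEveryOther_getD cs (j+1) (by omega)] at he
      have e2 : 2 * j + 2 = 2 * (j + 1) := by omega
      rw [e2]; exact he
    · rw [pvEveryOther_length, List.length_tail] at hj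
      refine ⟨2 * j + 1, by omega, ?_⟩
      rw [pvEveryOther_getD cs.tail j (by simp [List.length_tail]; omega),
          pvEveryOther_getD cs.tail (j+1) (by simp [List.length_tail]; omega),
          tail_getD cs (2*j) (by omega), tail_getD cs (2*(j+1)) (by omega)] at he
      have e2 : 2 * (j + 1) + 1 = 2 * j + 1 + 2 := by omega
      rw [e2] at he; exact he

-- ===== VERDICT (by name: the statement is the Claim_ definition above) =====
theorem skipcheck_spec : Claim_equal_skipcheck := by
  intro line _
  unfold Spec_skipcheck skipcheck skipcheck_alt
  simp only [skipcheck_slice_len, skipcheck_fold_eq]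
  set cs := line.toList with hcs
  rw [Bool.eq_iff_iff]
  by_cases h : ((List.range (cs.length - 2)).any
      fun ch => cs.getD ch ' ' == cs.getD (ch + 2) ' ') = true
  · rw [if_pos h,
      show (if (("nice" : String) == "nice") = true then true else false) = true from by decide]
    simp only [true_iff]
    simp only [List.any_eq_true, List.mem_range] at h
    obtain ⟨i, hi, he⟩ := h
    exact (parity_iff cs).mp ⟨i, by omega, by simpa using he⟩
  · rw [if_neg h,
      show (if (("naughty" : String) == "nice") = true then true else false) = false from by decide]
    constructor
    · intro hc; exact absurd hc (by decide)
    · intro hrhs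
      obtain ⟨i, hi, he⟩ := (parity_iff cs).mpr hrhs
      exact absurd (by
        simp only [List.any_eq_true, List.mem_range]
        exact ⟨i, by omega, by simpa using he⟩) h
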